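-- pv_equiv track=rewrite | github.com/Ayush-Chaudhary/Metabolic_Readiness | src/pipeline_utils.py | _extract_categories_from_actions
-- ===== SOURCE A (Python) =====
-- from typing import Dict, Any, List, Optional
--
-- def _extract_categories_from_actions(action_keys: List[str]) -> set:
--     categories = set()
--
--     category_mapping = {
--         'glucose': ['glucose_'],
--         'steps': ['steps_'],
--         'activity': ['activity_', 'exercise_'],
--         'sleep': ['sleep_'],
--         'weight': ['weight_'],
--         'food': ['meal_', 'nutrient_', 'food_'],
--         'medications': ['medication_', 'med_'],
--         'mental_wellbeing': ['mental_', 'meditation_', 'journal_'],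
--         'journey': ['journey_'],
--         'explore': ['explore_']
--     }
--
--     for action_key in action_keys:
--         for category, prefixes in category_mapping.items():
--             if any(action_key.startswith(prefix) for prefix in prefixes):
--                 categories.add(category)
--                 break
--
--     return categories
-- ===== SOURCE B (Python) =====
-- # One flat hash lookup per key: since every recognised prefix is the key's text up to and
-- # including its first underscore, slice that out once and look it up in a prefix->category dict.
-- _PREFIX_TO_CATEGORY = {
--     'glucose_': 'glucose',
--     'steps_': 'steps',
--     'activity_': 'activity',
--     'exercise_': 'activity',
--     'sleep_': 'sleep',
--     'weight_': 'weight',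
--     'meal_': 'food',
--     'nutrient_': 'food',
--     'food_': 'food',
--     'medication_': 'medications',
--     'med_': 'medications',
--     'mental_': 'mental_wellbeing',
--     'meditation_': 'mental_wellbeing',
--     'journal_': 'mental_wellbeing',
--     'journey_': 'journey',
--     'explore_': 'explore',
-- }
--
-- def _extract_categories_from_actions(action_keys):
--     categories = set()
--     for key in action_keys:
--         category = _PREFIX_TO_CATEGORY.get(key[:key.find('_') + 1])
--         if category is not None:
--             categories.add(category)
--     return categories
-- ===== Notes on version B (the rewrite author's own statement) =====
-- stated objective: faster
-- what changed: Replaces the per-key scan over the nested category->prefixes mapping (with break) by a single flat prefix->category dict and one O(1) lookup of the key's slice up to and including its first underscore, exploiting that every recognised prefix is exactly that slice.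
import Mathlib
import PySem

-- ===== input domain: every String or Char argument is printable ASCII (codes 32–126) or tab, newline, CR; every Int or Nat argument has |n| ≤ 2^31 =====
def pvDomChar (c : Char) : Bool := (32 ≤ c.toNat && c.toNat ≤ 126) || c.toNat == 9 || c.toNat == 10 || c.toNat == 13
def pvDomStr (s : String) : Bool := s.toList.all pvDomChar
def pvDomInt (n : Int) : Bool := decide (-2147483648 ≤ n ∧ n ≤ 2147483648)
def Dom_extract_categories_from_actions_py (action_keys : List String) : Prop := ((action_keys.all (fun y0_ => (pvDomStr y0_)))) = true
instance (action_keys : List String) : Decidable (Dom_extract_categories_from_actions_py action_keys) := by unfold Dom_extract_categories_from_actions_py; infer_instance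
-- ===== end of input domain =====

-- B replaces A's per-key scan of the nested category→prefixes mapping by one flat
-- prefix→category dict lookup of the key's slice up to its first underscore (objective: faster).

-- ===== PORT A =====
def pvCategoryMapping : PySem.Dict String (List String) :=
  PySem.Dict.ofList
    [("glucose", ["glucose_"]),
     ("steps", ["steps_"]),
     ("activity", ["activity_", "exercise_"]),
     ("sleep", ["sleep_"]),
     ("weight", ["weight_"]),
     ("food", ["meal_", "nutrient_", "food_"]),
     ("medications", ["medication_", "med_"]),
     ("mental_wellbeing", ["mental_", "meditation_", "journal_"]),
     ("journey", ["journey_"]),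
     ("explore", ["explore_"])]

-- inner 'for category, prefixes in category_mapping.items(): … break'
def pvInner (actionKey : String) (cats : PySem.Set String) :
    List (String × List String) → PySem.Set String
  | [] => cats
  | (category, prefixes) :: rest =>
    if prefixes.any (fun p => PySem.Str.startswith actionKey p) then
      PySem.Set.add cats category
    else pvInner actionKey cats rest

def extract_categories_from_actions_py (action_keys : List String) : List String :=
  action_keys.foldl (fun cats k => pvInner k cats pvCategoryMapping.items) PySem.Set.empty

-- ===== PORT B =====
def pvPrefixToCategory : PySem.Dict String String :=
  PySem.Dict.ofList
    [("glucose_", "glucose"),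
     ("steps_", "steps"),
     ("activity_", "activity"),
     ("exercise_", "activity"),
     ("sleep_", "sleep"),
     ("weight_", "weight"),
     ("meal_", "food"),
     ("nutrient_", "food"),
     ("food_", "food"),
     ("medication_", "medications"),
     ("med_", "medications"),
     ("mental_", "mental_wellbeing"),
     ("meditation_", "mental_wellbeing"),
     ("journal_", "mental_wellbeing"),
     ("journey_", "journey"),
     ("explore_", "explore")]

def extract_categories_from_actions_py_alt (action_keys : List String) : List String :=
  action_keys.foldl
    (fun cats key =>
      match pvPrefixToCategory.get?
          (PySem.Str.slice key none (some (PySem.Str.find key "_" + 1))) with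
      | some category => PySem.Set.add cats category
      | none => cats)
    PySem.Set.empty

-- ===== PRECONDITION & SPEC =====
def Spec_extract_categories_from_actions_py (action_keys : List String) (out : List String) : Prop := out = extract_categories_from_actions_py_alt action_keys
instance (action_keys : List String) (out : List String) : Decidable (Spec_extract_categories_from_actions_py action_keys out) := by unfold Spec_extract_categories_from_actions_py; infer_instance

-- ===== CLAIM (what is proved, stated in full; the proofs are below) =====
def Claim_equal_extract_categories_from_actions_py : Prop := ∀ (action_keys : List String), Dom_extract_categories_from_actions_py action_keys → Spec_extract_categories_from_actions_py action_keys (extract_categories_from_actions_py action_keys)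

-- ===== LEMMAS AND PROOFS =====

-- a string equals String.ofList q iff its char list is q
theorem pv_str_eq_ofList_iff (s : String) (q : List Char) : s = String.ofList q ↔ s.toList = q := by
  constructor
  · rintro rfl; simp
  · intro h; rw [← h]; simp

-- first occurrence split of a member
theorem pv_exists_first_split {c : Char} :
    ∀ {l : List Char}, c ∈ l → ∃ q r, l = q ++ c :: r ∧ c ∉ q := by
  intro l hl
  induction l with
  | nil => cases hl
  | cons x xs ih =>
    by_cases hx : x = c
    · exact ⟨[], xs, by simp [hx], by simp⟩
    · have hm : c ∈ xs := by
        cases hl with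
        | head => exact absurd rfl hx
        | tail _ h => exact h
      obtain ⟨q, r, hqr, hq⟩ := ih hm
      refine ⟨x :: q, r, by simp [hqr], ?_⟩
      intro hmem
      rcases List.mem_cons.mp hmem with h | h
      · exact hx h.symm
      · exact hq h

-- a prefix 'a_' of 'q_r' with no inner underscores forces a = q
theorem pv_pfx_uniq : ∀ (a q r : List Char), '_' ∉ a → '_' ∉ q →
    (a ++ ['_']) <+: (q ++ '_' :: r) → a = q := by
  intro a
  induction a with
  | nil =>
    intro q r _ hq hp
    cases q with
    | nil => rfl
    | cons d q' =>
      obtain ⟨t, ht⟩ := hp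
      simp at ht
      exact absurd (ht.1 ▸ List.mem_cons_self) hq
  | cons c a' ih =>
    intro q r ha hq hp
    cases q with
    | nil =>
      obtain ⟨t, ht⟩ := hp
      simp at ht
      exact absurd (ht.1 ▸ List.mem_cons_self) ha
    | cons d q' =>
      obtain ⟨t, ht⟩ := hp
      simp at ht
      obtain ⟨hcd, htail⟩ := ht
      have := ih q' r (fun h => ha (List.mem_cons_of_mem _ h))
        (fun h => hq (List.mem_cons_of_mem _ h)) ⟨t, by simpa using htail⟩
      simp [hcd, this]

-- value of find on a key whose first underscore is at position q.length
theorem pv_find_underscore (q r : List Char) (hq : '_' ∉ q) :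
    PySem.Chars.find (q ++ '_' :: r) ['_'] = (q.length : Int) := by
  set cs := q ++ '_' :: r with hcs
  have hinf : ['_'] <:+: cs := ⟨q, r, by simp [hcs]⟩
  have hne : PySem.Chars.find cs ['_'] ≠ -1 := by
    rw [Ne, PySem.Chars.find_eq_neg_one_iff]; exact fun h => h hinf
  have hspec := PySem.Chars.findFrom_natCast_spec cs ['_'] 0 (Nat.zero_le _)
  simp only [Nat.cast_zero, PySem.Chars.findFrom_zero] at hspec
  obtain ⟨hge, hpfx, hmin⟩ := hspec hne
  set n := (PySem.Chars.find cs ['_']).toNat with hn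
  have hnq : n = q.length := by
    rcases lt_trichotomy n q.length with h | h | h
    · exfalso
      obtain ⟨t, ht⟩ := hpfx
      have hdrop : List.drop n cs = List.drop n q ++ '_' :: r := by
        rw [hcs, List.drop_append_of_le_length (le_of_lt h)]
      rw [hdrop] at ht
      have hqd : List.drop n q ≠ [] := by
        simp [List.drop_eq_nil_iff]; omega
      cases hdq : List.drop n q with
      | nil => exact hqd hdq
      | cons y ys =>
        rw [hdq] at ht
        simp at ht
        have : y ∈ q := by
          have : y ∈ List.drop n q := by rw [hdq]; exact List.mem_cons_self
          exact List.mem_of_mem_drop this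
        exact hq (ht.1 ▸ this)
    · exact h
    · exfalso
      exact hmin q.length (Nat.zero_le _) h (by rw [hcs]; exact ⟨r, by simp⟩)
  omega

-- the classification both programs compute, as a function of the key's prefix-slice
def pvClassify (s : List Char) : Option String :=
  if s = "glucose_".toList then some "glucose"
  else if s = "steps_".toList then some "steps"
  else if s = "activity_".toList ∨ s = "exercise_".toList then some "activity"
  else if s = "sleep_".toList then some "sleep"
  else if s = "weight_".toList then some "weight"
  else if s = "meal_".toList ∨ s = "nutrient_".toList ∨ s = "food_".toList then some "food"
  else if s = "medication_".toList ∨ s = "med_".toList then some "medications"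
  else if s = "mental_".toList ∨ s = "meditation_".toList ∨ s = "journal_".toList then
    some "mental_wellbeing"
  else if s = "journey_".toList then some "journey"
  else if s = "explore_".toList then some "explore"
  else none

-- B's dict lookup computes pvClassify of the looked-up key's chars
set_option maxHeartbeats 2000000 in
theorem pv_get_eq_classify (s : List Char) :
    pvPrefixToCategory.get? (String.ofList s) = pvClassify s := by
  have hkey : ∀ (lit : String), (lit == String.ofList s) = decide (s = lit.toList) := by
    intro lit
    by_cases hs : s = lit.toList
    · have hl : lit = String.ofList s := (pv_str_eq_ofList_iff lit s).mpr hs.symm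
      rw [hl]; simp
    · have hl : lit ≠ String.ofList s := fun he => hs (((pv_str_eq_ofList_iff lit s).mp he).symm)
      simp [hs, hl]
  rw [show pvPrefixToCategory = PySem.Dict.mk
    [("glucose_", "glucose"), ("steps_", "steps"), ("activity_", "activity"),
     ("exercise_", "activity"), ("sleep_", "sleep"), ("weight_", "weight"),
     ("meal_", "food"), ("nutrient_", "food"), ("food_", "food"),
     ("medication_", "medications"), ("med_", "medications"), ("mental_", "mental_wellbeing"),
     ("meditation_", "mental_wellbeing"), ("journal_", "mental_wellbeing"),
     ("journey_", "journey"), ("explore_", "explore")] by decide]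
  simp only [PySem.Dict.get?_mk_cons, hkey, decide_eq_true_eq, pvClassify]
  generalize ("glucose_" : String).toList = l0
  generalize ("steps_" : String).toList = l1
  generalize ("activity_" : String).toList = l2
  generalize ("exercise_" : String).toList = l3
  generalize ("sleep_" : String).toList = l4
  generalize ("weight_" : String).toList = l5
  generalize ("meal_" : String).toList = l6
  generalize ("nutrient_" : String).toList = l7
  generalize ("food_" : String).toList = l8
  generalize ("medication_" : String).toList = l9
  generalize ("med_" : String).toList = l10
  generalize ("mental_" : String).toList = l11
  generalize ("meditation_" : String).toList = l12
  generalize ("journal_" : String).toList = l13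
  generalize ("journey_" : String).toList = l14
  generalize ("explore_" : String).toList = l15
  by_cases h0 : s = l0
  · simp [h0]
  by_cases h1 : s = l1
  · simp [h0, h1.symm]
  by_cases h2 : s = l2
  · simp [h0, h1, h2.symm]
  by_cases h3 : s = l3
  · simp [h0, h1, h2, h3.symm]
  by_cases h4 : s = l4
  · simp [h0, h1, h2, h3, h4.symm]
  by_cases h5 : s = l5
  · simp [h0, h1, h2, h3, h4, h5.symm]
  by_cases h6 : s = l6
  · simp [h0, h1, h2, h3, h4, h5, h6.symm]
  by_cases h7 : s = l7
  · simp [h0, h1, h2, h3, h4, h5, h6, h7.symm]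
  by_cases h8 : s = l8
  · simp [h0, h1, h2, h3, h4, h5, h6, h7, h8.symm]
  by_cases h9 : s = l9
  · simp [h0, h1, h2, h3, h4, h5, h6, h7, h8, h9.symm]
  by_cases h10 : s = l10
  · simp [h0, h1, h2, h3, h4, h5, h6, h7, h8, h9, h10.symm]
  by_cases h11 : s = l11
  · simp [h0, h1, h2, h3, h4, h5, h6, h7, h8, h9, h10, h11.symm]
  by_cases h12 : s = l12
  · simp [h0, h1, h2, h3, h4, h5, h6, h7, h8, h9, h10, h11, h12.symm]
  by_cases h13 : s = l13
  · simp [h0, h1, h2, h3, h4, h5, h6, h7, h8, h9, h10, h11, h12, h13.symm]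
  by_cases h14 : s = l14
  · simp [h0, h1, h2, h3, h4, h5, h6, h7, h8, h9, h10, h11, h12, h13, h14.symm]
  by_cases h15 : s = l15
  · simp [h0, h1, h2, h3, h4, h5, h6, h7, h8, h9, h10, h11, h12, h13, h14, h15.symm]
  simp [h0, h1, h2, h3, h4, h5, h6, h7, h8, h9, h10, h11, h12, h13, h14, h15]
  rfl

-- the per-key startswith test, on a key split at its first underscore
theorem pv_sw_eq (q r : List Char) (p : String) (a : List Char)
    (hp : p.toList = a ++ ['_']) (hq : '_' ∉ q) (ha : '_' ∉ a) :
    PySem.Chars.startswith (q ++ '_' :: r) p.toList = decide (q ++ ['_'] = p.toList) := by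
  by_cases he : q ++ ['_'] = p.toList
  · have ht : PySem.Chars.startswith (q ++ '_' :: r) p.toList = true := by
      rw [PySem.Chars.startswith_iff, ← he]
      exact ⟨r, by simp⟩
    rw [ht]; simp [he]
  · have hf : PySem.Chars.startswith (q ++ '_' :: r) p.toList = false := by
      rw [Bool.eq_false_iff, Ne, PySem.Chars.startswith_iff, hp]
      intro h
      exact he (by rw [hp, pv_pfx_uniq a q r ha hq h])
    rw [hf]; simp [he]

-- A's inner loop computes pvClassify of the same slice (key split at its first underscore)
set_option maxHeartbeats 2000000 in
theorem pv_inner_eq_classify (q r : List Char) (hq : '_' ∉ q) (cats : PySem.Set String) :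
    pvInner (String.ofList (q ++ '_' :: r)) cats pvCategoryMapping.items =
      (match pvClassify (q ++ ['_']) with
        | some c => PySem.Set.add cats c
        | none => cats) := by
  have hsw : ∀ (p : String) (a : List Char), p.toList = a ++ ['_'] → '_' ∉ a →
      PySem.Str.startswith (String.ofList (q ++ '_' :: r)) p = decide (q ++ ['_'] = p.toList) := by
    intro p a hp ha
    rw [PySem.Str.startswith_eq]
    simp only [String.toList_ofList]
    exact pv_sw_eq q r p a hp hq ha
  rw [show pvCategoryMapping.items = [("glucose", ["glucose_"]),
     ("steps", ["steps_"]),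
     ("activity", ["activity_", "exercise_"]),
     ("sleep", ["sleep_"]),
     ("weight", ["weight_"]),
     ("food", ["meal_", "nutrient_", "food_"]),
     ("medications", ["medication_", "med_"]),
     ("mental_wellbeing", ["mental_", "meditation_", "journal_"]),
     ("journey", ["journey_"]),
     ("explore", ["explore_"])] by decide]
  simp only [pvInner, List.any_cons, List.any_nil, Bool.or_false, Bool.or_eq_true,
    decide_eq_true_eq,
    hsw "glucose_" "glucose".toList (by decide) (by decide),
    hsw "steps_" "steps".toList (by decide) (by decide),
    hsw "activity_" "activity".toList (by decide) (by decide),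
    hsw "exercise_" "exercise".toList (by decide) (by decide),
    hsw "sleep_" "sleep".toList (by decide) (by decide),
    hsw "weight_" "weight".toList (by decide) (by decide),
    hsw "meal_" "meal".toList (by decide) (by decide),
    hsw "nutrient_" "nutrient".toList (by decide) (by decide),
    hsw "food_" "food".toList (by decide) (by decide),
    hsw "medication_" "medication".toList (by decide) (by decide),
    hsw "med_" "med".toList (by decide) (by decide),
    hsw "mental_" "mental".toList (by decide) (by decide),
    hsw "meditation_" "meditation".toList (by decide) (by decide),
    hsw "journal_" "journal".toList (by decide) (by decide),
    hsw "journey_" "journey".toList (by decide) (by decide),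
    hsw "explore_" "explore".toList (by decide) (by decide),
    pvClassify]
  split_ifs <;> rfl

-- the two per-key step functions agree on every key
set_option maxHeartbeats 2000000 in
theorem pv_step_eq (cats : PySem.Set String) (k : String) :
    pvInner k cats pvCategoryMapping.items =
      (match pvPrefixToCategory.get?
          (PySem.Str.slice k none (some (PySem.Str.find k "_" + 1))) with
        | some category => PySem.Set.add cats category
        | none => cats) := by
  by_cases hu : '_' ∈ k.toList
  · obtain ⟨q, r, hqr, hq⟩ := pv_exists_first_split hu
    have hk : k = String.ofList (q ++ '_' :: r) := (pv_str_eq_ofList_iff k _).mpr hqr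
    have hfind : PySem.Str.find k "_" = (q.length : Int) := by
      rw [PySem.Str.find_eq, hqr]
      exact pv_find_underscore q r hq
    have hslice : PySem.Str.slice k none (some (PySem.Str.find k "_" + 1)) =
        String.ofList (q ++ ['_']) := by
      rw [pv_str_eq_ofList_iff, PySem.Str.toList_slice, PySem.Chars.slice_eq_listSlice,
        hqr, hfind]
      rw [show (q.length : Int) + 1 = ((q.length + 1 : Nat) : Int) by push_cast; ring]
      rw [PySem.List.slice_to_natCast]
      simp [List.take_append]
    rw [hslice, pv_get_eq_classify, hk]
    exact pv_inner_eq_classify q r hq cats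
  · -- no underscore in the key: no prefix matches and the slice is the empty string
    have hfind : PySem.Str.find k "_" = -1 := by
      rw [PySem.Str.find_eq, PySem.Chars.find_eq_neg_one_iff]
      intro hinf
      exact hu (hinf.sublist.subset (by simp))
    have hslice : PySem.Str.slice k none (some (PySem.Str.find k "_" + 1)) =
        String.ofList [] := by
      rw [pv_str_eq_ofList_iff, PySem.Str.toList_slice, PySem.Chars.slice_eq_listSlice, hfind]
      rw [show (-1 : Int) + 1 = ((0 : Nat) : Int) by ring]
      rw [PySem.List.slice_to_natCast]
      simp
    have hsw : ∀ (p : List Char), '_' ∈ p → PySem.Chars.startswith k.toList p = false := by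
      intro p hp
      rw [Bool.eq_false_iff, Ne, PySem.Chars.startswith_iff]
      intro hpre
      exact hu (hpre.sublist.subset hp)
    rw [hslice, pv_get_eq_classify, show pvClassify [] = none from by decide]
    rw [show pvCategoryMapping.items = [("glucose", ["glucose_"]),
     ("steps", ["steps_"]),
     ("activity", ["activity_", "exercise_"]),
     ("sleep", ["sleep_"]),
     ("weight", ["weight_"]),
     ("food", ["meal_", "nutrient_", "food_"]),
     ("medications", ["medication_", "med_"]),
     ("mental_wellbeing", ["mental_", "meditation_", "journal_"]),
     ("journey", ["journey_"]),
     ("explore", ["explore_"])] by decide]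
    simp [pvInner, hsw]

-- ===== VERDICT (by name: the statement is the Claim_ definition above) =====
theorem extract_categories_from_actions_py_spec : Claim_equal_extract_categories_from_actions_py := by
  intro action_keys _
  unfold Spec_extract_categories_from_actions_py
  unfold extract_categories_from_actions_py extract_categories_from_actions_py_alt
  congr 1
  funext cats k
  exact pv_step_eq cats k
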